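-- pv_equiv track=rewrite | github.com/914491719/Data-Mining-Experiment | 《机器学习与数据挖掘实验》02/实验2.py | Max_3_fun
-- ===== SOURCE A (Python) =====
-- def Max_3_fun(S_coefficient,ignore):
--     re=[0,0,0]
--     rank=[0,0,0]
--     index=0
--     for i in S_coefficient:
--         if ignore==index:
--             index += 1
--             continue
--         for j in range(0, 3):
--             if i > re[j]:
--                 re.insert(j,i)
--                 rank.insert(j,index)
--                 break
--         index += 1
--
--     return rank[0],rank[1],rank[2]
-- ===== SOURCE B (Python) =====
-- def Max_3_fun(S_coefficient, ignore):
--     pairs = sorted(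
--         ((v, idx) for idx, v in enumerate(S_coefficient) if idx != ignore and v > 0),
--         key=lambda p: p[0], reverse=True)
--     top = [p[1] for p in pairs[:3]] + [0, 0, 0]
--     return top[0], top[1], top[2]
-- ===== Notes on version B (the rewrite author's own statement) =====
-- stated objective: simpler
-- what changed: Replaces the hand-maintained insertion of each value into growing re/rank sentinel lists with one filter (skip the ignored index and non-positive values), one stable descending sort of (value, index) pairs, and taking the first three indices padded with zeros.
import Mathlib
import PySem

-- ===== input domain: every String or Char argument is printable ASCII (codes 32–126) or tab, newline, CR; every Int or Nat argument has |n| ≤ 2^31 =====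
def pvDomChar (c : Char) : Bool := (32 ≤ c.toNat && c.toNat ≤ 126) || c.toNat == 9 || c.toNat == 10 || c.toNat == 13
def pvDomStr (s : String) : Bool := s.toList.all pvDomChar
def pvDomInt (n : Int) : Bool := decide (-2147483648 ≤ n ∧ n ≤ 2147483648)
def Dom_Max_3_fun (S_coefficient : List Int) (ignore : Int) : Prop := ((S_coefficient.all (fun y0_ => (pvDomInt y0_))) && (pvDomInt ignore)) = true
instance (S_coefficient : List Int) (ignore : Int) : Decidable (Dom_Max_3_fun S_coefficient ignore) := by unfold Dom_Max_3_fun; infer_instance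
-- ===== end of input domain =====

-- B replaces A's per-element insertion into growing sentinel lists by one filter + one
-- stable descending sort of (value, index) pairs, taking the first three indices padded
-- with zeros (objective: simpler).

-- ===== PORT A =====
-- inner 'for j in range(0, 3): if i > re[j]: …insert…; break' loop.
-- re always has length ≥ 3 (it starts as [0,0,0] and only grows), so re[j] for
-- j ∈ {0,1,2} never raises; pyGetD with default 0 is exact here.
def Max3A_inner (v idx : Int) (re rank : List Int) : List Int → List Int × List Int
  | [] => (re, rank)
  | j :: rest =>
    if v > PySem.List.pyGetD re j 0 then
      (PySem.List.insert re j v, PySem.List.insert rank j idx)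
    else Max3A_inner v idx re rank rest

-- outer 'for i in S_coefficient' loop carrying re, rank and the index counter
def Max3A_loop (ignore : Int) : List Int → Int → List Int → List Int → List Int × List Int
  | [], _, re, rank => (re, rank)
  | v :: rest, index, re, rank =>
    if ignore == index then Max3A_loop ignore rest (index + 1) re rank
    else
      let p := Max3A_inner v index re rank (PySem.List.pyRange 0 3 1)
      Max3A_loop ignore rest (index + 1) p.1 p.2

-- rank always has length ≥ 3, so rank[0], rank[1], rank[2] never raise; pyGetD is exact.
def Max_3_fun (S_coefficient : List Int) (ignore : Int) : Int × Int × Int :=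
  let p := Max3A_loop ignore S_coefficient 0 [0, 0, 0] [0, 0, 0]
  (PySem.List.pyGetD p.2 0 0, PySem.List.pyGetD p.2 1 0, PySem.List.pyGetD p.2 2 0)

-- ===== PORT B =====
-- top always has length ≥ 3 (three zeros appended), so top[0..2] never raise; pyGetD is exact.
def Max_3_fun_alt (S_coefficient : List Int) (ignore : Int) : Int × Int × Int :=
  let pairs := PySem.List.sorted
    (((PySem.List.enumerate S_coefficient).filter
        (fun p => p.1 != ignore && p.2 > 0)).map (fun p => (p.2, p.1)))
    (fun p => p.1) true
  let top := (PySem.List.slice pairs none (some 3)).map (fun p => p.2) ++ [0, 0, 0]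
  (PySem.List.pyGetD top 0 0, PySem.List.pyGetD top 1 0, PySem.List.pyGetD top 2 0)

-- ===== PRECONDITION & SPEC =====
def Spec_Max_3_fun (S_coefficient : List Int) (ignore : Int) (out : Int × Int × Int) : Prop := out = Max_3_fun_alt S_coefficient ignore
instance (S_coefficient : List Int) (ignore : Int) (out : Int × Int × Int) : Decidable (Spec_Max_3_fun S_coefficient ignore out) := by unfold Spec_Max_3_fun; infer_instance

-- ===== CLAIM (what is proved, stated in full; the proofs are below) =====
def Claim_equal_Max_3_fun : Prop := ∀ (S_coefficient : List Int) (ignore : Int), Dom_Max_3_fun S_coefficient ignore → Spec_Max_3_fun S_coefficient ignore (Max_3_fun S_coefficient ignore)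

-- ===== LEMMAS AND PROOFS =====

-- first three entries of a list, padded with A's 0 sentinels
def pad3 (l : List Int) : List Int := (l ++ [0, 0, 0]).take 3

-- B's fold step (what sorted(…, reverse=True) unfolds to via sorted_rev_eq_foldl_insertBy)
def insStep (acc : List (Int × Int)) (x : Int × Int) : List (Int × Int) :=
  PySem.List.insertBy (fun a b => decide (b.1 < a.1)) x acc

-- the pairs B builds from the suffix of the enumeration starting at index s,
-- folded into an accumulator
def accOf (ignore : Int) (xs : List Int) (s : Int) (acc : List (Int × Int)) : List (Int × Int) :=
  (((PySem.List.enumerate xs s).filter (fun p => p.1 != ignore && p.2 > 0)).map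
      (fun p => (p.2, p.1))).foldl insStep acc

lemma take3_shape (l : List Int) (a b c : Int) (h : l.take 3 = [a, b, c]) :
    ∃ t, l = a :: b :: c :: t := by
  match l with
  | [] => simp at h
  | [x] => simp at h
  | [x, y] => simp at h
  | x :: y :: z :: t =>
    simp [List.take] at h
    exact ⟨t, by simp [h.1, h.2.1, h.2.2]⟩

lemma mem_pad3 (l : List Int) (x : Int) (hx : x ∈ pad3 l) : x ∈ l ∨ x = 0 := by
  unfold pad3 at hx
  have := List.mem_of_mem_take hx
  rcases List.mem_append.mp this with h | h
  · exact Or.inl h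
  · right; simpa using h

lemma pyRange3 : PySem.List.pyRange 0 3 1 = [0, 1, 2] := by decide

-- Python's re[1] / re[2] on a list of length ≥ 3
lemma pyGetD_one_cons3 (a b c : Int) (t : List Int) :
    PySem.List.pyGetD (a :: b :: c :: t) 1 0 = b := by
  simp [PySem.List.pyGetD, PySem.List.pyGet?, PySem.List.pyIdx?]
  rw [if_pos (by omega)]
  simp

lemma pyGetD_two_cons3 (a b c : Int) (t : List Int) :
    PySem.List.pyGetD (a :: b :: c :: t) 2 0 = c := by
  simp [PySem.List.pyGetD, PySem.List.pyGet?, PySem.List.pyIdx?]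
  rw [if_pos (by omega)]
  simp

-- Python's list.insert at positions 1 and 2 on a list of length ≥ 3
lemma insert_one_cons3 (a b c v : Int) (t : List Int) :
    PySem.List.insert (a :: b :: c :: t) 1 v = a :: v :: b :: c :: t := by
  rw [PySem.List.insert_ofNat _ 1 v (by simp)]
  simp

lemma insert_two_cons3 (a b c v : Int) (t : List Int) :
    PySem.List.insert (a :: b :: c :: t) 2 v = a :: b :: v :: c :: t := by
  rw [PySem.List.insert_ofNat _ 2 v (by simp)]
  simp [List.take, List.drop]

-- the inner loop on a value that cannot beat any slot (v ≤ 0) leaves the state unchanged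
lemma pad3_shape (l : List Int) : ∃ a b c, pad3 l = [a, b, c] := by
  rcases l with _ | ⟨p, _ | ⟨q, _ | ⟨r, u⟩⟩⟩
  · exact ⟨0, 0, 0, by simp [pad3]⟩
  · exact ⟨p, 0, 0, by simp [pad3]⟩
  · exact ⟨p, q, 0, by simp [pad3]⟩
  · exact ⟨p, q, r, by simp [pad3]⟩

-- the inner loop on a value that cannot beat any slot (v ≤ 0) leaves the state unchanged
lemma inner_skip (v idx : Int) (re rank : List Int) (acc : List (Int × Int))
    (hv : ∀ p ∈ acc, 0 < p.1)
    (hre : re.take 3 = pad3 (acc.map Prod.fst))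
    (hvle : v ≤ 0) :
    Max3A_inner v idx re rank (PySem.List.pyRange 0 3 1) = (re, rank) := by
  obtain ⟨a, b, c, hpad⟩ := pad3_shape (acc.map Prod.fst)
  obtain ⟨t, rfl⟩ := take3_shape re a b c (hre.trans hpad)
  have hnn : ∀ x ∈ pad3 (acc.map Prod.fst), 0 ≤ x := by
    intro x hx
    rcases mem_pad3 _ _ hx with h | h
    · rcases List.mem_map.mp h with ⟨p, hp, rfl⟩; exact le_of_lt (hv p hp)
    · omega
  have ha : 0 ≤ a := hnn a (by rw [hpad]; simp)
  have hb : 0 ≤ b := hnn b (by rw [hpad]; simp)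
  have hc : 0 ≤ c := hnn c (by rw [hpad]; simp)
  rw [pyRange3]
  simp only [Max3A_inner, PySem.List.pyGetD_zero_cons]
  rw [if_neg (by omega)]
  rw [pyGetD_one_cons3, if_neg (by omega), pyGetD_two_cons3, if_neg (by omega)]

-- the inner loop on a positive value performs exactly B's stable descending insertion,
-- viewed through the first three slots
lemma inner_insert (v idx : Int) (re rank : List Int) (acc : List (Int × Int))
    (hre : re.take 3 = pad3 (acc.map Prod.fst))
    (hrank : rank.take 3 = pad3 (acc.map Prod.snd))
    (hvpos : 0 < v) :
    (Max3A_inner v idx re rank (PySem.List.pyRange 0 3 1)).1.take 3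
        = pad3 ((insStep acc (v, idx)).map Prod.fst)
    ∧ (Max3A_inner v idx re rank (PySem.List.pyRange 0 3 1)).2.take 3
        = pad3 ((insStep acc (v, idx)).map Prod.snd) := by
  obtain ⟨a, b, c, hpad⟩ := pad3_shape (acc.map Prod.fst)
  obtain ⟨a', b', c', hpad'⟩ := pad3_shape (acc.map Prod.snd)
  obtain ⟨t, rfl⟩ := take3_shape re a b c (hre.trans hpad)
  obtain ⟨u, rfl⟩ := take3_shape rank a' b' c' (hrank.trans hpad')
  rw [pyRange3]
  rcases acc with _ | ⟨p, _ | ⟨q, _ | ⟨r, w⟩⟩⟩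
  · simp [pad3] at hpad hpad'
    obtain ⟨rfl, rfl, rfl⟩ := hpad
    obtain ⟨rfl, rfl, rfl⟩ := hpad'
    simp [Max3A_inner, insStep, PySem.List.insertBy, PySem.List.insert_zero, pad3, hvpos]
  · simp [pad3] at hpad hpad'
    obtain ⟨rfl, rfl, rfl⟩ := hpad
    obtain ⟨rfl, rfl, rfl⟩ := hpad'
    by_cases h0 : p.1 < v
    · simp [Max3A_inner, insStep, PySem.List.insertBy, PySem.List.insert_zero, pad3, h0]
    · simp [Max3A_inner, insStep, PySem.List.insertBy,
        pyGetD_one_cons3, insert_one_cons3, pad3, h0, hvpos]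
  · simp [pad3] at hpad hpad'
    obtain ⟨rfl, rfl, rfl⟩ := hpad
    obtain ⟨rfl, rfl, rfl⟩ := hpad'
    by_cases h0 : p.1 < v
    · simp [Max3A_inner, insStep, PySem.List.insertBy, PySem.List.insert_zero, pad3, h0]
    · by_cases h1 : q.1 < v
      · simp [Max3A_inner, insStep, PySem.List.insertBy,
          pyGetD_one_cons3, insert_one_cons3, pad3, h0, h1]
      · simp [Max3A_inner, insStep, PySem.List.insertBy,
          pyGetD_one_cons3, pyGetD_two_cons3, insert_two_cons3, pad3, h0, h1, hvpos]
  · simp [pad3] at hpad hpad'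
    obtain ⟨rfl, rfl, rfl⟩ := hpad
    obtain ⟨rfl, rfl, rfl⟩ := hpad'
    by_cases h0 : p.1 < v
    · simp [Max3A_inner, insStep, PySem.List.insertBy, PySem.List.insert_zero, pad3, h0]
    · by_cases h1 : q.1 < v
      · simp [Max3A_inner, insStep, PySem.List.insertBy,
          pyGetD_one_cons3, insert_one_cons3, pad3, h0, h1]
      · by_cases h2 : r.1 < v
        · simp [Max3A_inner, insStep, PySem.List.insertBy,
            pyGetD_one_cons3, pyGetD_two_cons3, insert_two_cons3, pad3, h0, h1, h2]
        · simp [Max3A_inner, insStep, PySem.List.insertBy,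
            pyGetD_one_cons3, pyGetD_two_cons3, pad3, h0, h1, h2]

-- one step of B's pair list: the three shapes of the head of the enumeration
lemma accOf_cons (ignore v : Int) (rest : List Int) (index : Int) (acc : List (Int × Int)) :
    accOf ignore (v :: rest) index acc
      = if index ≠ ignore ∧ 0 < v then accOf ignore rest (index + 1) (insStep acc (v, index))
        else accOf ignore rest (index + 1) acc := by
  unfold accOf
  rw [PySem.List.enumerate_cons]
  by_cases h1 : index = ignore
  · simp [h1]
  · by_cases h2 : 0 < v <;> simp [h1, h2]

-- main loop invariant: A's first three slots track B's insertion fold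
lemma loop_inv (ignore : Int) (xs : List Int) (index : Int) (acc : List (Int × Int))
    (re rank : List Int)
    (hv : ∀ p ∈ acc, 0 < p.1)
    (hre : re.take 3 = pad3 (acc.map Prod.fst))
    (hrank : rank.take 3 = pad3 (acc.map Prod.snd)) :
    (Max3A_loop ignore xs index re rank).1.take 3
        = pad3 ((accOf ignore xs index acc).map Prod.fst)
    ∧ (Max3A_loop ignore xs index re rank).2.take 3
        = pad3 ((accOf ignore xs index acc).map Prod.snd) := by
  induction xs generalizing index acc re rank with
  | nil =>
    unfold accOf
    simp [Max3A_loop, PySem.List.enumerate]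
    exact ⟨hre, hrank⟩
  | cons v rest ih =>
    rw [accOf_cons]
    by_cases hig : ignore = index
    · rw [if_neg (by omega)]
      have hA : Max3A_loop ignore (v :: rest) index re rank
          = Max3A_loop ignore rest (index + 1) re rank := by
        simp [Max3A_loop, hig]
      rw [hA]
      exact ih (index + 1) acc re rank hv hre hrank
    · by_cases hpos : 0 < v
      · rw [if_pos ⟨by omega, hpos⟩]
        have hA : Max3A_loop ignore (v :: rest) index re rank
            = Max3A_loop ignore rest (index + 1)
                (Max3A_inner v index re rank (PySem.List.pyRange 0 3 1)).1
                (Max3A_inner v index re rank (PySem.List.pyRange 0 3 1)).2 := by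
          simp [Max3A_loop, hig]
        obtain ⟨hre', hrank'⟩ := inner_insert v index re rank acc hre hrank hpos
        have hv' : ∀ p ∈ insStep acc (v, index), 0 < p.1 := by
          intro p hp
          rcases (PySem.List.mem_insertBy _ _ _ _).mp hp with rfl | hp
          · exact hpos
          · exact hv p hp
        rw [hA]
        exact ih (index + 1) (insStep acc (v, index)) _ _ hv' hre' hrank'
      · rw [if_neg (by tauto)]
        have hA : Max3A_loop ignore (v :: rest) index re rank
            = Max3A_loop ignore rest (index + 1) re rank := by
          simp [Max3A_loop, hig,
            inner_skip v index re rank acc hv hre (by omega)]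
        rw [hA]
        exact ih (index + 1) acc re rank hv hre hrank

lemma pad3_take (l : List Int) : pad3 l = (l.take 3 ++ [0, 0, 0]).take 3 := by
  rcases l with _ | ⟨p, _ | ⟨q, _ | ⟨r, u⟩⟩⟩ <;> simp [pad3]

-- B's sorted pair list, named for the proofs
def Bpairs (S : List Int) (ignore : Int) : List (Int × Int) :=
  PySem.List.sorted
    (((PySem.List.enumerate S).filter (fun p => p.1 != ignore && p.2 > 0)).map
      (fun p => (p.2, p.1))) (fun p => p.1) true

-- ===== VERDICT (by name: the statement is the Claim_ definition above) =====
theorem Max_3_fun_spec : Claim_equal_Max_3_fun := by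
  intro S ignore _
  obtain ⟨h1, h2⟩ := loop_inv ignore S 0 [] [0, 0, 0] [0, 0, 0]
    (by simp) (by simp [pad3]) (by simp [pad3])
  have hpairs : Bpairs S ignore = accOf ignore S 0 [] := by
    rw [Bpairs, PySem.List.sorted_rev_eq_foldl_insertBy]
    rfl
  rw [← hpairs] at h2
  obtain ⟨x, y, z, hp3⟩ := pad3_shape ((Bpairs S ignore).map Prod.snd)
  obtain ⟨t, ht⟩ := take3_shape _ x y z (h2.trans hp3)
  have hsl : PySem.List.slice (Bpairs S ignore) none (some 3) = (Bpairs S ignore).take 3 := by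
    simpa using PySem.List.slice_to_natCast (Bpairs S ignore) 3
  have htop : (((PySem.List.slice (Bpairs S ignore) none (some 3)).map
      (fun p : Int × Int => p.2)) ++ [0, 0, 0]).take 3 = [x, y, z] := by
    rw [hsl, List.map_take, show (fun p : Int × Int => p.2) = Prod.snd from rfl,
      ← pad3_take, hp3]
  obtain ⟨t', ht'⟩ := take3_shape _ x y z htop
  show (PySem.List.pyGetD (Max3A_loop ignore S 0 [0, 0, 0] [0, 0, 0]).2 0 0,
        PySem.List.pyGetD (Max3A_loop ignore S 0 [0, 0, 0] [0, 0, 0]).2 1 0,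
        PySem.List.pyGetD (Max3A_loop ignore S 0 [0, 0, 0] [0, 0, 0]).2 2 0)
      = (PySem.List.pyGetD (((PySem.List.slice (Bpairs S ignore) none (some 3)).map
            (fun p : Int × Int => p.2)) ++ [0, 0, 0]) 0 0,
         PySem.List.pyGetD (((PySem.List.slice (Bpairs S ignore) none (some 3)).map
            (fun p : Int × Int => p.2)) ++ [0, 0, 0]) 1 0,
         PySem.List.pyGetD (((PySem.List.slice (Bpairs S ignore) none (some 3)).map
            (fun p : Int × Int => p.2)) ++ [0, 0, 0]) 2 0)
  rw [ht, ht']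
  simp [PySem.List.pyGetD_zero_cons, pyGetD_one_cons3, pyGetD_two_cons3]
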